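-- pv_equiv track=rewrite | github.com/MrKelly94/SpellingCorrection | GED.py | GED_Soundex
-- ===== SOURCE A (Python) =====
-- ScoreTable = [[0 for col in range(26)] for row in range(26)]
--
-- def Max(a, b, c):
--     max=a
--     if max<b:
--         max=b
--     if max<c:
--         max=c
--     return max
--
-- def GetIndex(character):
--     index = 0
--     if character=='a':
--         index = 0
--     elif character=='b':
--         index = 1
--     elif character=='c':
--         index = 2
--     elif character=='d':
--         index = 3
--     elif character=='e':
--         index = 4
--     elif character=='f':
--         index = 5
--     elif character=='g':
--         index = 6
--     elif character=='h':
--         index = 7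
--     elif character=='i':
--         index = 8
--     elif character=='j':
--         index = 9
--     elif character=='k':
--         index = 10
--     elif character=='l':
--         index = 11
--     elif character=='m':
--         index = 12
--     elif character=='n':
--         index = 13
--     elif character=='o':
--         index = 14
--     elif character=='p':
--         index = 15
--     elif character=='q':
--         index = 16
--     elif character=='r':
--         index = 17
--     elif character=='s':
--         index = 18
--     elif character=='t':
--         index = 19
--     elif character=='u':
--         index = 20
--     elif character=='v':
--         index = 21
--     elif character=='w':
--         index = 22
--     elif character=='x':
--         index = 23
--     elif character=='y':
--         index = 24
--     elif character=='z':
--         index = 25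
--     return index
--
-- def GetReplaceScore(q, d):
--     que_index = int(GetIndex(q))
--     dic_index = int(GetIndex(d))
--     return ScoreTable[que_index][dic_index]
--
-- def GED_Soundex(QueString, DicString):
--     insert = -3
--     delete = -3
--     match = 3
--     scoreMatrix = [[0 for col in range(len(QueString)+1)] for row in range(len(DicString)+1)]
--     # Initialize scoring matrix
--     for DicLetter in range(len(DicString)+1):
--         scoreMatrix[DicLetter][0]=-1*DicLetter
--     for QueLetter in range(len(QueString)+1):
--         scoreMatrix[0][QueLetter]=-1*QueLetter
--
--     for d in range(1, len(DicString)+1):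
--         for q in range(1, len(QueString)+1):
--             if DicString[d-1]!=QueString[q-1]:
--                 insertScore = scoreMatrix[d][q-1]+insert
--                 deleteScore = scoreMatrix[d-1][q]+delete
--                 replaceScore = scoreMatrix[d-1][q-1]+int(GetReplaceScore(QueString[q-1],DicString[d-1]))
--                 scoreMatrix[d][q] = Max(insertScore, deleteScore, replaceScore)
--             elif DicString[d-1]==QueString[q-1]:
--                 scoreMatrix[d][q] = scoreMatrix[d-1][q-1]+match
--
--     return scoreMatrix[len(DicString)][len(QueString)]
-- ===== SOURCE B (Python) =====
-- ScoreTable = [[0] * 26 for _ in range(26)]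
--
-- def GetIndex(character):
--     return ord(character) - 97 if 'a' <= character <= 'z' else 0
--
-- def GetReplaceScore(q, d):
--     return ScoreTable[GetIndex(q)][GetIndex(d)]
--
-- def GED_Soundex(QueString, DicString):
--     # top-down memoized recursion over the pair of index positions (d, q)
--     w = len(QueString) + 1
--     cache = [None] * ((len(DicString) + 1) * w)
--
--     def f(d, q):
--         if d == 0:
--             return -q
--         if q == 0:
--             return -d
--         key = d * w + q
--         v = cache[key]
--         if v is None:
--             if DicString[d - 1] == QueString[q - 1]:
--                 v = f(d - 1, q - 1) + 3
--             else:
--                 v = max(f(d, q - 1) - 3,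
--                         f(d - 1, q) - 3,
--                         f(d - 1, q - 1) + GetReplaceScore(QueString[q - 1], DicString[d - 1]))
--             cache[key] = v
--         return v
--
--     return f(len(DicString), len(QueString))
-- ===== Notes on version B (the rewrite author's own statement) =====
-- stated objective: alternative
-- what changed: B replaces A's bottom-up construction of the full (|Dic|+1)x(|Que|+1) score matrix (two initialization loops plus nested index loops) by a top-down memoized recursive function f(d,q) over the index pair with base cases f(0,q)=-q, f(d,0)=-d and a flat memo cache keyed by d*(|Que|+1)+q, returning f(len(Dic),len(Que)); the letter index is computed arithmetically instead of a 26-branch if/elif chain.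
import Mathlib
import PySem

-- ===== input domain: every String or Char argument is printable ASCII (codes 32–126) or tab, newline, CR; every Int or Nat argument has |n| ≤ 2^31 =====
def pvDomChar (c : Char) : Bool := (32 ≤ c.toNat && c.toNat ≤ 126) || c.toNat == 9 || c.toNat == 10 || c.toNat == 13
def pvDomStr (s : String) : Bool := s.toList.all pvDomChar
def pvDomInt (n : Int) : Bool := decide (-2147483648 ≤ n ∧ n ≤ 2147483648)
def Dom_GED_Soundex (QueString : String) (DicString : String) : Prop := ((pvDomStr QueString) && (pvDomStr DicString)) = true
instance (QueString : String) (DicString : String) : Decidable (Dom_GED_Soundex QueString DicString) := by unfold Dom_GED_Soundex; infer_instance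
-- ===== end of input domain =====

-- B replaces A's bottom-up score-matrix construction (two init loops + nested index loops over a
-- (|Dic|+1)×(|Que|+1) matrix) by a top-down memoized recursion on the index pair (d, q) with a
-- dictionary cache; same return value, same O(|Que|·|Dic|) cost.

-- ===== PORT A =====
-- ScoreTable = [[0 for col in range(26)] for row in range(26)]
def ScoreTable : List (List Int) := List.replicate 26 (List.replicate 26 0)

-- the 26-branch if/elif chain of GetIndex, literally
def GetIndex (character : Char) : Int :=
  if character == 'a' then 0
  else if character == 'b' then 1
  else if character == 'c' then 2
  else if character == 'd' then 3
  else if character == 'e' then 4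
  else if character == 'f' then 5
  else if character == 'g' then 6
  else if character == 'h' then 7
  else if character == 'i' then 8
  else if character == 'j' then 9
  else if character == 'k' then 10
  else if character == 'l' then 11
  else if character == 'm' then 12
  else if character == 'n' then 13
  else if character == 'o' then 14
  else if character == 'p' then 15
  else if character == 'q' then 16
  else if character == 'r' then 17
  else if character == 's' then 18
  else if character == 't' then 19
  else if character == 'u' then 20
  else if character == 'v' then 21
  else if character == 'w' then 22
  else if character == 'x' then 23
  else if character == 'y' then 24
  else if character == 'z' then 25
  else 0

def GetReplaceScore (q : Char) (d : Char) : Int :=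
  let que_index := GetIndex q       -- int(...) on an int is the identity
  let dic_index := GetIndex d
  PySem.List.pyGetD (PySem.List.pyGetD ScoreTable que_index []) dic_index 0  -- indices are always in [0,25]

-- def Max(a,b,c): running max with two ifs, literally
def pyMax (a : Int) (b : Int) (c : Int) : Int :=
  let m := a
  let m := if m < b then b else m
  let m := if m < c then c else m
  m

-- m[i][j] / m[i][j] = v (all indices used are in range)
def get2 (m : List (List Int)) (i : Int) (j : Int) : Int :=
  PySem.List.pyGetD (PySem.List.pyGetD m i []) j 0

def set2 (m : List (List Int)) (i : Int) (j : Int) (v : Int) : List (List Int) :=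
  PySem.List.pySetD m i (PySem.List.pySetD (PySem.List.pyGetD m i []) j v)

def GED_Soundex (QueString : String) (DicString : String) : Int :=
  let qs := QueString.toList
  let ds := DicString.toList
  let insert : Int := -3
  let delete : Int := -3
  let mtch : Int := 3
  let scoreMatrix : List (List Int) :=
    List.replicate (ds.length + 1) (List.replicate (qs.length + 1) 0)
  -- Initialize scoring matrix
  let scoreMatrix :=
    (PySem.List.pyRange 0 ((ds.length : Int) + 1) 1).foldl
      (fun m DicLetter => set2 m DicLetter 0 (-1 * DicLetter)) scoreMatrix
  let scoreMatrix :=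
    (PySem.List.pyRange 0 ((qs.length : Int) + 1) 1).foldl
      (fun m QueLetter => set2 m 0 QueLetter (-1 * QueLetter)) scoreMatrix
  let scoreMatrix :=
    (PySem.List.pyRange 1 ((ds.length : Int) + 1) 1).foldl
      (fun m d =>
        (PySem.List.pyRange 1 ((qs.length : Int) + 1) 1).foldl
          (fun m q =>
            let dch := PySem.List.pyGetD ds (d - 1) ' '
            let qch := PySem.List.pyGetD qs (q - 1) ' '
            if dch != qch then
              let insertScore := get2 m d (q - 1) + insert
              let deleteScore := get2 m (d - 1) q + delete
              let replaceScore := get2 m (d - 1) (q - 1) + GetReplaceScore qch dch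
              set2 m d q (pyMax insertScore deleteScore replaceScore)
            else if dch == qch then
              set2 m d q (get2 m (d - 1) (q - 1) + mtch)
            else m) m) scoreMatrix
  get2 scoreMatrix (ds.length : Int) (qs.length : Int)

-- ===== PORT B =====
-- ScoreTable = [[0] * 26 for _ in range(26)]
def ScoreTableAlt : List (List Int) := (List.range 26).map (fun _ => PySem.List.pyRepeat [0] 26)

def GetIndexB (character : Char) : Int :=
  if 'a' ≤ character ∧ character ≤ 'z' then (character.toNat : Int) - ('a'.toNat : Int) else 0

def GetReplaceScoreB (q : Char) (d : Char) : Int :=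
  PySem.List.pyGetD (PySem.List.pyGetD ScoreTableAlt (GetIndexB q) []) (GetIndexB d) 0

-- the inner recursive function f(d, q) with the mutable memo list threaded through
-- (cache = [None] * ((len(Dic)+1) * w), entry d*w+q); d and q are list lengths/positions
-- (always ≥ 0), so they are carried as Nat; cache[key] reads/writes and the string
-- indexing D[d-1]/Q[q-1] are always in range here, so List.getD / List.set are exact
def fB (qs ds : List Char) (w : Nat) : Nat → Nat → List (Option Int) → Int × List (Option Int)
  | 0, q, c => (-(q : Int), c)
  | d+1, 0, c => (-((d : Int) + 1), c)
  | d+1, q+1, c =>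
      match c.getD ((d+1) * w + (q+1)) none with
      | some v => (v, c)
      | none =>
          let r : Int × List (Option Int) :=
            if ds.getD d ' ' == qs.getD q ' ' then
              let p := fB qs ds w d q c
              (p.1 + 3, p.2)
            else
              let p1 := fB qs ds w (d+1) q c
              let p2 := fB qs ds w d (q+1) p1.2
              let p3 := fB qs ds w d q p2.2
              (max (max (p1.1 - 3) (p2.1 - 3))
                   (p3.1 + GetReplaceScoreB (qs.getD q ' ') (ds.getD d ' ')), p3.2)
          (r.1, r.2.set ((d+1) * w + (q+1)) (some r.1))
  termination_by d q c => (d, q)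

def GED_Soundex_alt (QueString : String) (DicString : String) : Int :=
  let qs := QueString.toList
  let ds := DicString.toList
  let cache : List (Option Int) := List.replicate ((ds.length + 1) * (qs.length + 1)) none
  (fB qs ds (qs.length + 1) ds.length qs.length cache).1

-- ===== PRECONDITION & SPEC =====
def Spec_GED_Soundex (QueString : String) (DicString : String) (out : Int) : Prop := out = GED_Soundex_alt QueString DicString
instance (QueString : String) (DicString : String) (out : Int) : Decidable (Spec_GED_Soundex QueString DicString out) := by unfold Spec_GED_Soundex; infer_instance

-- ===== CLAIM (what is proved, stated in full; the proofs are below) =====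
def Claim_equal_GED_Soundex : Prop := ∀ (QueString : String) (DicString : String), Dom_GED_Soundex QueString DicString → Spec_GED_Soundex QueString DicString (GED_Soundex QueString DicString)

-- ===== LEMMAS AND PROOFS =====

-- both replace scores are 0: the score table is all zeros
theorem pyGetD_prop {α : Type} (xs : List α) (i : Int) (d : α) (P : α → Prop)
    (hd : P d) (hx : ∀ x ∈ xs, P x) : P (PySem.List.pyGetD xs i d) := by
  rcases h : PySem.List.pyGet? xs i with _ | v
  · simpa only [PySem.List.pyGetD, h, Option.getD_none] using hd
  · exact (by simpa only [PySem.List.pyGetD, h, Option.getD_some]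
      using hx v (PySem.List.mem_of_pyGet?_eq_some xs h) : P (PySem.List.pyGetD xs i d))

theorem pyGetD_table_zero (i j : Int) :
    PySem.List.pyGetD (PySem.List.pyGetD (List.replicate 26 (List.replicate 26 (0:Int))) i []) j 0 = 0 := by
  refine pyGetD_prop _ i [] (fun r => PySem.List.pyGetD r j 0 = 0) ?_ ?_
  · refine pyGetD_prop _ j 0 (fun x => x = 0) rfl ?_
    intro x hx; cases hx
  · intro r hr
    rw [(List.mem_replicate.mp hr).2]
    refine pyGetD_prop _ j 0 (fun x => x = 0) rfl ?_
    intro x hx; exact (List.mem_replicate.mp hx).2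

theorem grs_eq_zero (q d : Char) : GetReplaceScore q d = 0 := by
  unfold GetReplaceScore ScoreTable
  exact pyGetD_table_zero _ _

theorem grsB_eq_zero (q d : Char) : GetReplaceScoreB q d = 0 := by
  unfold GetReplaceScoreB ScoreTableAlt
  refine pyGetD_prop _ _ [] (fun r => PySem.List.pyGetD r (GetIndexB d) 0 = 0) ?_ ?_
  · exact pyGetD_prop _ _ 0 (fun x => x = 0) rfl (by intro x hx; cases hx)
  · intro r hr
    simp only [List.mem_map] at hr
    obtain ⟨_, _, rfl⟩ := hr
    rw [PySem.List.pyRepeat_singleton]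
    exact pyGetD_prop _ _ 0 (fun x => x = 0) rfl (fun x hx => (List.mem_replicate.mp hx).2)

theorem pyMax_eq_max (a b c : Int) : pyMax a b c = max (max a b) c := by
  unfold pyMax
  dsimp only
  split_ifs <;> omega

-- the recurrence both programs compute, as a pure recursion on the index pair
def gRec (qs ds : List Char) : Nat → Nat → Int
  | 0, q => -(q : Int)
  | d+1, 0 => -((d : Int) + 1)
  | d+1, q+1 =>
      if ds.getD d ' ' == qs.getD q ' ' then gRec qs ds d q + 3
      else max (max (gRec qs ds (d+1) q - 3) (gRec qs ds d (q+1) - 3)) (gRec qs ds d q)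
  termination_by d q => (d, q)

-- ---- A side: row-by-row abstraction of the matrix fold ----
def innerRec (dc : Char) : List (Char × Int) → Int → Int → List Int
  | [], _, _ => []
  | (qc, up) :: rest, last, diag =>
      let v := if dc == qc then diag + 3 else max (max (last - 3) (up - 3)) diag
      v :: innerRec dc rest v up

def rowStep (qs : List Char) (d : Int) (dc : Char) (prev : List Int) : List Int :=
  (-d) :: innerRec dc (qs.zip prev.tail) (-d) (prev.getD 0 0)

def rowsFun (qs : List Char) : List Int → Int → List Char → List Int
  | prev, _, [] => prev
  | prev, d, dc :: rest => rowsFun qs (rowStep qs d dc prev) (d + 1) rest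

def row0 (qs : List Char) : List Int := (List.range (qs.length + 1)).map (fun (q : Nat) => -(q : Int))

def rowsA (qs ds : List Char) (k : Nat) : List Int := rowsFun qs (row0 qs) 1 (ds.take k)

@[simp] theorem length_innerRec (dc : Char) (ps : List (Char × Int)) (last diag : Int) :
    (innerRec dc ps last diag).length = ps.length := by
  induction ps generalizing last diag with
  | nil => rfl
  | cons p rest ih => cases p; simp [innerRec, ih]

theorem length_rowStep (qs : List Char) (d : Int) (dc : Char) (prev : List Int)
    (h : prev.length = qs.length + 1) : (rowStep qs d dc prev).length = qs.length + 1 := by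
  simp [rowStep, List.length_zip, h, List.length_tail]

theorem length_rowsA (qs ds : List Char) (k : Nat) : (rowsA qs ds k).length = qs.length + 1 := by
  unfold rowsA
  have H : ∀ (l : List Char) (prev : List Int) (d : Int), prev.length = qs.length + 1 →
      (rowsFun qs prev d l).length = qs.length + 1 := by
    intro l
    induction l with
    | nil => intro prev d h; simpa [rowsFun] using h
    | cons c rest ih => intro prev d h; simp [rowsFun]; exact ih _ _ (length_rowStep qs d c prev h)
  exact H _ _ _ (by simp [row0])

theorem rowsFun_append_singleton (qs : List Char) (l : List Char) (c : Char) :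
    ∀ (prev : List Int) (d : Int),
    rowsFun qs prev d (l ++ [c]) = rowStep qs (d + l.length) c (rowsFun qs prev d l) := by
  induction l with
  | nil => intro prev d; simp [rowsFun]
  | cons x rest ih =>
      intro prev d
      simp only [List.cons_append, rowsFun]
      rw [ih]
      congr 1
      simp only [List.length_cons]
      push_cast
      ring

theorem rowsA_succ (qs ds : List Char) (k : Nat) (hk : k < ds.length) :
    rowsA qs ds (k + 1) = rowStep qs ((k : Int) + 1) ds[k] (rowsA qs ds k) := by
  unfold rowsA
  rw [List.take_add_one, List.getElem?_eq_getElem hk]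
  simp only [Option.toList_some]
  rw [rowsFun_append_singleton]
  congr 1
  simp [List.length_take, Nat.min_eq_left (le_of_lt hk)]
  ring

-- ---- generic list helpers ----
theorem getD_cons_append_getLast (x : Int) (done rest : List Int) :
    ((x :: done) ++ rest).getD done.length 0 = (x :: done).getLast (by simp) := by
  rw [List.getLast_eq_getElem]
  rw [List.getD_eq_getElem?_getD, List.getElem?_append_left (by simp),
      List.getElem?_eq_getElem (by simp)]
  simp only [Option.getD_some, List.length_cons, Nat.add_sub_cancel]
  rfl

theorem set_map_range {α : Type} (f : Nat → α) (n i : Nat) (v : α) (hi : i < n) :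
    ((List.range n).map f).set i v = (List.range n).map (fun j => if j = i then v else f j) := by
  apply List.ext_getElem
  · simp
  · intro j h1 h2
    simp only [List.getElem_set, List.getElem_map, List.getElem_range]
    split_ifs with h3 h4 <;> first | rfl | omega

theorem map_range_congr {α : Type} (f g : Nat → α) (n : Nat)
    (h : ∀ i, i < n → f i = g i) : (List.range n).map f = (List.range n).map g := by
  apply List.map_congr_left
  intro i hi
  exact h i (List.mem_range.mp hi)

-- ---- A side: matrix evolution ----
def initRow (nq : Nat) (i : Nat) : List Int := (-(i : Int)) :: List.replicate nq 0

def matA (qs ds : List Char) (k : Nat) : List (List Int) :=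
  (List.range (ds.length + 1)).map
    (fun i => if i ≤ k then rowsA qs ds i else initRow qs.length i)

def matI (qs ds : List Char) (k : Nat) (r : List Int) : List (List Int) :=
  (matA qs ds k).set (k + 1) r

-- the inner-loop body of port A, as a named function (definitionally the port's lambda)
def innerBodyA (qs ds : List Char) (d : Int) (m : List (List Int)) (q : Int) : List (List Int) :=
  let dch := PySem.List.pyGetD ds (d - 1) ' '
  let qch := PySem.List.pyGetD qs (q - 1) ' '
  if dch != qch then
    let insertScore := get2 m d (q - 1) + (-3)
    let deleteScore := get2 m (d - 1) q + (-3)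
    let replaceScore := get2 m (d - 1) (q - 1) + GetReplaceScore qch dch
    set2 m d q (pyMax insertScore deleteScore replaceScore)
  else if dch == qch then
    set2 m d q (get2 m (d - 1) (q - 1) + 3)
  else m

theorem getD_set_self {α : Type} (l : List α) (i : Nat) (v d : α) (h : i < l.length) :
    (l.set i v).getD i d = v := by
  simp [List.getD_eq_getElem?_getD, List.getElem?_set_self, h]

theorem getD_set_ne {α : Type} (l : List α) (i j : Nat) (v d : α) (h : j ≠ i) :
    (l.set i v).getD j d = l.getD j d := by
  simp [List.getD_eq_getElem?_getD, List.getElem?_set_ne (by omega : i ≠ j)]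

theorem set_append_len {α : Type} (l m : List α) (v : α) :
    (l ++ m).set l.length v = l ++ m.set 0 v := by simp

theorem set_eq_self_of_getD {α : Type} (l : List α) (i : Nat) (v d : α)
    (_ : i < l.length) (hv : l.getD i d = v) : l.set i v = l := by
  apply List.ext_getElem
  · simp
  · intro j h1 h2
    rw [List.getElem_set]
    split_ifs with hj
    · subst hj; rw [← hv]; simp [List.getD_eq_getElem?_getD, List.getElem?_eq_getElem h2]
    · rfl

theorem replicate_eq_map_range {α : Type} (n : Nat) (c : α) :
    List.replicate n c = (List.range n).map (fun _ => c) := by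
  simp [List.map_const']

theorem getD_matA (qs ds : List Char) (k i : Nat) (hi : i < ds.length + 1) :
    (matA qs ds k).getD i [] = if i ≤ k then rowsA qs ds i else initRow qs.length i := by
  unfold matA; rw [PySem.List.getD_map_range _ _ _ _ hi]

theorem length_matA (qs ds : List Char) (k : Nat) : (matA qs ds k).length = ds.length + 1 := by
  simp [matA]

theorem getD_matI_self (qs ds : List Char) (k : Nat) (r : List Int) (hk : k < ds.length) :
    (matI qs ds k r).getD (k + 1) [] = r :=
  getD_set_self _ _ _ _ (by rw [length_matA]; omega)

theorem getD_matI_prev (qs ds : List Char) (k : Nat) (r : List Int) (hk : k < ds.length) :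
    (matI qs ds k r).getD k [] = rowsA qs ds k := by
  rw [matI, getD_set_ne _ _ _ _ _ (by omega), getD_matA _ _ _ _ (by omega), if_pos (le_refl k)]

-- the value the inner body writes at column j+1 of row k+1
def cellVal (qs ds : List Char) (k j : Nat) (last : Int) : Int :=
  if ds.getD k ' ' == qs.getD j ' ' then (rowsA qs ds k).getD j 0 + 3
  else max (max (last - 3) ((rowsA qs ds k).getD (j + 1) 0 - 3)) ((rowsA qs ds k).getD j 0)

theorem get2_natCast (m : List (List Int)) (i j : Nat) :
    get2 m (i : Int) (j : Int) = (m.getD i []).getD j 0 := by simp [get2]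

theorem set2_natCast (m : List (List Int)) (i j : Nat) (v : Int) :
    set2 m (i : Int) (j : Int) v = m.set i ((m.getD i []).set j v) := by simp [set2]

theorem innerBodyA_eval (qs ds : List Char) (k j t : Nat) (hk : k < ds.length)
    (hj : j < qs.length) (done : List Int) (hdone : done.length = j) (last : Int)
    (hlast : (((-((k : Int) + 1)) :: done)).getLast (by simp) = last) :
    innerBodyA qs ds ((k : Int) + 1)
      (matI qs ds k (((-((k : Int) + 1)) :: done) ++ List.replicate (t + 1) 0)) ((j : Int) + 1)
    = matI qs ds k (((-((k : Int) + 1)) :: done) ++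
        (cellVal qs ds k j last :: List.replicate t 0)) := by
  have hd1 : ((k : Int) + 1) - 1 = ((k : Nat) : Int) := by ring
  have hq1 : ((j : Int) + 1) - 1 = ((j : Nat) : Int) := by ring
  have hcast1 : ((k : Int) + 1) = ((k + 1 : Nat) : Int) := by push_cast; ring
  have hcast2 : ((j : Int) + 1) = ((j + 1 : Nat) : Int) := by push_cast; ring
  set M := matI qs ds k (((-((k : Int) + 1)) :: done) ++ List.replicate (t + 1) 0) with hM
  have hrowd : M.getD (k + 1) [] = ((-((k : Int) + 1)) :: done) ++ List.replicate (t + 1) 0 :=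
    getD_matI_self _ _ _ _ hk
  have hrowp : M.getD k [] = rowsA qs ds k := getD_matI_prev _ _ _ _ hk
  have hget_cur : get2 M ((k : Int) + 1) (((j : Int) + 1) - 1) = last := by
    rw [hq1, hcast1, get2_natCast, hrowd, ← hdone, getD_cons_append_getLast, hlast]
  have hget_up : get2 M (((k : Int) + 1) - 1) ((j : Int) + 1) = (rowsA qs ds k).getD (j + 1) 0 := by
    rw [hd1, hcast2, get2_natCast, hrowp]
  have hget_diag : get2 M (((k : Int) + 1) - 1) (((j : Int) + 1) - 1) = (rowsA qs ds k).getD j 0 := by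
    rw [hd1, hq1, get2_natCast, hrowp]
  have hset : ∀ v : Int, set2 M ((k : Int) + 1) ((j : Int) + 1) v
      = matI qs ds k (((-((k : Int) + 1)) :: done) ++ (v :: List.replicate t 0)) := by
    intro v
    rw [hcast1, hcast2, set2_natCast, hrowd]
    have hidx : (j + 1) = (((-((k : Int) + 1)) :: done)).length := by simp [hdone]
    rw [hidx, set_append_len]
    simp only [List.replicate_succ, List.set_cons_zero]
    rw [hM, matI, matI, List.set_set]
    simp
  have hdch : PySem.List.pyGetD ds (((k : Int) + 1) - 1) ' ' = ds[k] := by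
    rw [hd1, PySem.List.pyGetD_natCast, List.getD_eq_getElem _ ' ' (by omega)]
  have hqch : PySem.List.pyGetD qs (((j : Int) + 1) - 1) ' ' = qs[j] := by
    rw [hq1, PySem.List.pyGetD_natCast, List.getD_eq_getElem _ ' ' (by omega)]
  unfold innerBodyA
  dsimp only
  rw [hdch, hqch]
  have hcell : cellVal qs ds k j last =
      if ds[k] == qs[j] then (rowsA qs ds k).getD j 0 + 3
      else max (max (last - 3) ((rowsA qs ds k).getD (j + 1) 0 - 3)) ((rowsA qs ds k).getD j 0) := by
    unfold cellVal
    rw [List.getD_eq_getElem _ ' ' (by omega : k < ds.length),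
        List.getD_eq_getElem _ ' ' (by omega : j < qs.length)]
  by_cases hc : (ds[k] == qs[j]) = true
  · have hne : (ds[k] != qs[j]) = false := by simp [bne, hc]
    rw [hne]
    simp only [Bool.false_eq_true, if_false, hc, if_true]
    rw [hget_diag, hset, hcell, if_pos hc]
  · have hcf : (ds[k] == qs[j]) = false := by revert hc; cases (ds[k] == qs[j]) <;> simp
    have hne : (ds[k] != qs[j]) = true := by simp [bne, hcf]
    rw [hne]
    simp only [if_true]
    rw [hget_cur, hget_up, hget_diag, grs_eq_zero, add_zero, hset, hcell, if_neg hc,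
        pyMax_eq_max]
    simp [sub_eq_add_neg]

theorem getD_concat_length (l : List Int) (v : Int) : (l ++ [v]).getD l.length 0 = v := by
  simp [List.getD_eq_getElem?_getD, List.getElem?_concat_length]

theorem getLast_eq_getD_cons (x : Int) (done : List Int) :
    (x :: done).getLast (by simp) = (x :: done).getD done.length 0 := by
  have := getD_cons_append_getLast x done []
  simpa using this.symm

theorem zip_tail_drop (qs ds : List Char) (k j : Nat) (hj : j < qs.length)
    (hlen : (rowsA qs ds k).length = qs.length + 1) :
    (qs.zip (rowsA qs ds k).tail).drop j
      = (qs[j], (rowsA qs ds k).getD (j + 1) 0) :: (qs.zip (rowsA qs ds k).tail).drop (j + 1) := by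
  have hz : (qs.zip (rowsA qs ds k).tail).length = qs.length := by
    simp [List.length_zip, List.length_tail, hlen]
  rw [List.drop_eq_getElem_cons (by omega)]
  congr 1
  rw [List.getElem_zip, List.getElem_tail]
  congr 1
  rw [List.getD_eq_getElem _ 0 (by omega)]

theorem inner_loop (qs ds : List Char) (k : Nat) (hk : k < ds.length) :
    ∀ (t j : Nat), j + t = qs.length → ∀ (done : List Int), done.length = j →
    (PySem.List.pyRange ((j : Int) + 1) ((qs.length : Int) + 1) 1).foldl
      (innerBodyA qs ds ((k : Int) + 1))
      (matI qs ds k (((-((k : Int) + 1)) :: done) ++ List.replicate t 0))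
    = matI qs ds k (((-((k : Int) + 1)) :: done) ++
        innerRec (ds.getD k ' ') ((qs.zip (rowsA qs ds k).tail).drop j)
          (((-((k : Int) + 1)) :: done).getD done.length 0) ((rowsA qs ds k).getD j 0)) := by
  intro t
  induction t with
  | zero =>
      intro j hj done hdone
      have hjq : j = qs.length := by omega
      subst hjq
      rw [PySem.List.pyRange_one_eq_nil (by omega)]
      rw [List.drop_eq_nil_of_le (by simp [List.length_zip, List.length_tail, length_rowsA])]
      simp [innerRec]
  | succ t ih =>
      intro j hj done hdone
      subst hdone
      have hjlt : done.length < qs.length := by omega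
      rw [PySem.List.pyRange_one_cons (by omega)]
      rw [List.foldl_cons]
      rw [innerBodyA_eval qs ds k done.length t hk hjlt done rfl _
            (getLast_eq_getD_cons _ done)]
      have hstep := ih (done.length + 1) (by omega) (done ++ [cellVal qs ds k done.length (((-((k : Int) + 1)) :: done).getD done.length 0)])
        (by simp)
      have hcast : ((done.length : Int) + 1) + 1 = (((done.length + 1 : Nat) : Int)) + 1 := by push_cast; ring
      rw [hcast]
      have heq1 : ((-((k : Int) + 1)) :: done) ++
          (cellVal qs ds k done.length (((-((k : Int) + 1)) :: done).getD done.length 0) :: List.replicate t 0)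
          = ((-((k : Int) + 1)) :: (done ++ [cellVal qs ds k done.length (((-((k : Int) + 1)) :: done).getD done.length 0)]))
            ++ List.replicate t 0 := by simp
      rw [heq1, hstep]
      congr 1
      rw [zip_tail_drop qs ds k done.length hjlt (length_rowsA qs ds k)]
      rw [innerRec]
      have hlast2 : ((-((k : Int) + 1)) :: (done ++ [cellVal qs ds k done.length (((-((k : Int) + 1)) :: done).getD done.length 0)])).getD
          (done ++ [cellVal qs ds k done.length (((-((k : Int) + 1)) :: done).getD done.length 0)]).length 0
          = cellVal qs ds k done.length (((-((k : Int) + 1)) :: done).getD done.length 0) := by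
        rw [show ((-((k : Int) + 1)) :: (done ++ [cellVal qs ds k done.length (((-((k : Int) + 1)) :: done).getD done.length 0)]))
              = ((-((k : Int) + 1)) :: done) ++ [cellVal qs ds k done.length (((-((k : Int) + 1)) :: done).getD done.length 0)] by simp,
            show (done ++ [cellVal qs ds k done.length (((-((k : Int) + 1)) :: done).getD done.length 0)]).length
              = ((-((k : Int) + 1)) :: done).length by simp]
        exact getD_concat_length _ _
      rw [hlast2]
      have hhead : cellVal qs ds k done.length (((-((k : Int) + 1)) :: done).getD done.length 0)
          = (if ds.getD k ' ' == qs[done.length]'(by omega) then (rowsA qs ds k).getD done.length 0 + 3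
             else max (max ((((-((k : Int) + 1)) :: done).getD done.length 0) - 3)
                          ((rowsA qs ds k).getD (done.length + 1) 0 - 3)) ((rowsA qs ds k).getD done.length 0)) := by
        unfold cellVal
        rw [List.getD_eq_getElem _ ' ' (by omega : done.length < qs.length)]
      simp only [innerRec, hhead]
      simp [List.getD_eq_getElem?_getD, List.getElem?_eq_getElem]

theorem matI_rowsA (qs ds : List Char) (k : Nat) (hk : k < ds.length) :
    matI qs ds k (rowsA qs ds (k + 1)) = matA qs ds (k + 1) := by
  unfold matI matA
  rw [set_map_range _ _ _ _ (by omega)]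
  apply map_range_congr
  intro i hi
  by_cases h1 : i = k + 1
  · subst h1; simp
  · by_cases h2 : i ≤ k
    · rw [if_neg h1, if_pos h2, if_pos (by omega)]
    · rw [if_neg h1, if_neg h2, if_neg (by omega)]

theorem matA_as_matI (qs ds : List Char) (k : Nat) (hk : k < ds.length) :
    matA qs ds k = matI qs ds k (((-((k : Int) + 1)) :: []) ++ List.replicate qs.length 0) := by
  unfold matI
  refine (set_eq_self_of_getD _ _ _ [] (by rw [length_matA]; omega) ?_).symm
  rw [getD_matA _ _ _ _ (by omega), if_neg (by omega)]
  unfold initRow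
  push_cast
  simp

theorem outer_step (qs ds : List Char) (k : Nat) (hk : k < ds.length) :
    (PySem.List.pyRange 1 ((qs.length : Int) + 1) 1).foldl (innerBodyA qs ds ((k : Int) + 1))
      (matA qs ds k)
    = matA qs ds (k + 1) := by
  rw [matA_as_matI qs ds k hk]
  have h := inner_loop qs ds k hk qs.length 0 (by omega) [] rfl
  simp only [Nat.cast_zero, zero_add, List.drop_zero, List.length_nil] at h
  rw [h]
  have hrow : ((-((k : Int) + 1)) :: []) ++
      innerRec (ds.getD k ' ') (qs.zip (rowsA qs ds k).tail)
        (((-((k : Int) + 1)) :: ([] : List Int)).getD 0 0) ((rowsA qs ds k).getD 0 0)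
      = rowStep qs ((k : Int) + 1) (ds.getD k ' ') (rowsA qs ds k) := by
    simp [rowStep]
  rw [hrow]
  rw [show ds.getD k ' ' = ds[k] from List.getD_eq_getElem _ ' ' hk]
  rw [← rowsA_succ qs ds k hk]
  exact matI_rowsA qs ds k hk

theorem outer_loop (qs ds : List Char) : ∀ (t k : Nat), k + t = ds.length →
    (PySem.List.pyRange ((k : Int) + 1) ((ds.length : Int) + 1) 1).foldl
      (fun m d => (PySem.List.pyRange 1 ((qs.length : Int) + 1) 1).foldl (innerBodyA qs ds d) m)
      (matA qs ds k)
    = matA qs ds ds.length := by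
  intro t
  induction t with
  | zero =>
      intro k hk
      have : k = ds.length := by omega
      subst this
      rw [PySem.List.pyRange_one_eq_nil (a := ((ds.length : Int) + 1)) (b := ((ds.length : Int) + 1)) (le_refl _)]
      rfl
  | succ t ih =>
      intro k hk
      rw [PySem.List.pyRange_one_cons (a := ((k : Int) + 1)) (b := ((ds.length : Int) + 1)) (by omega),
          List.foldl_cons]
      rw [outer_step qs ds k (by omega)]
      have := ih (k + 1) (by omega)
      rw [show (((k + 1 : Nat) : Int)) + 1 = ((k : Int) + 1) + 1 by push_cast; ring] at this
      exact this

theorem init1_loop (qs ds : List Char) : ∀ (t k : Nat), k + t = ds.length + 1 →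
    (PySem.List.pyRange ((k : Nat) : Int) ((ds.length : Int) + 1) 1).foldl
      (fun m dL => set2 m dL 0 (-1 * dL))
      ((List.range (ds.length + 1)).map
        (fun i => if i < k then initRow qs.length i else List.replicate (qs.length + 1) 0))
    = (List.range (ds.length + 1)).map (initRow qs.length) := by
  intro t
  induction t with
  | zero =>
      intro k hk
      have : k = ds.length + 1 := by omega
      subst this
      rw [PySem.List.pyRange_one_eq_nil (by push_cast; omega)]
      apply map_range_congr
      intro i hi
      rw [if_pos (by omega)]
  | succ t ih =>
      intro k hk
      rw [PySem.List.pyRange_one_cons (by omega), List.foldl_cons]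
      have hbody : set2 ((List.range (ds.length + 1)).map
            (fun i => if i < k then initRow qs.length i else List.replicate (qs.length + 1) 0))
            ((k : Nat) : Int) 0 (-1 * ((k : Nat) : Int))
          = (List.range (ds.length + 1)).map
            (fun i => if i < k + 1 then initRow qs.length i else List.replicate (qs.length + 1) 0) := by
        rw [show ((0 : Int)) = (((0 : Nat) : Int)) by norm_num, set2_natCast]
        rw [PySem.List.getD_map_range _ _ _ _ (by omega), if_neg (by omega)]
        rw [List.replicate_succ, List.set_cons_zero]
        rw [set_map_range _ _ _ _ (by omega)]
        apply map_range_congr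
        intro i hi
        by_cases h1 : i = k
        · subst h1
          rw [if_pos rfl, if_pos (by omega)]
          unfold initRow
          norm_num
        · by_cases h2 : i < k
          · rw [if_neg h1, if_pos h2, if_pos (by omega)]
          · rw [if_neg h1, if_neg h2, if_neg (by omega)]
      rw [hbody]
      have := ih (k + 1) (by omega)
      rw [show (((k + 1 : Nat) : Int)) = ((k : Nat) : Int) + 1 by push_cast; ring] at this
      exact this

theorem init2_loop (qs ds : List Char) : ∀ (t j : Nat), j + t = qs.length + 1 →
    (PySem.List.pyRange ((j : Nat) : Int) ((qs.length : Int) + 1) 1).foldl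
      (fun m qL => set2 m 0 qL (-1 * qL))
      (((List.range (ds.length + 1)).map (initRow qs.length)).set 0
        ((List.range (qs.length + 1)).map (fun (q : Nat) => if q < j then -(q : Int) else 0)))
    = ((List.range (ds.length + 1)).map (initRow qs.length)).set 0 (row0 qs) := by
  intro t
  induction t with
  | zero =>
      intro j hj
      have : j = qs.length + 1 := by omega
      subst this
      rw [PySem.List.pyRange_one_eq_nil (by push_cast; omega)]
      simp only [List.foldl_nil]
      congr 1
      unfold row0
      apply map_range_congr
      intro i hi
      rw [if_pos (by omega)]
  | succ t ih =>
      intro j hj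
      rw [PySem.List.pyRange_one_cons (by omega), List.foldl_cons]
      have hbody : set2 (((List.range (ds.length + 1)).map (initRow qs.length)).set 0
            ((List.range (qs.length + 1)).map (fun (q : Nat) => if q < j then -(q : Int) else 0)))
            0 ((j : Nat) : Int) (-1 * ((j : Nat) : Int))
          = ((List.range (ds.length + 1)).map (initRow qs.length)).set 0
            ((List.range (qs.length + 1)).map (fun (q : Nat) => if q < j + 1 then -(q : Int) else 0)) := by
        have hs := set2_natCast (((List.range (ds.length + 1)).map (initRow qs.length)).set 0
            ((List.range (qs.length + 1)).map (fun (q : Nat) => if q < j then -(q : Int) else 0)))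
            0 j (-1 * ((j : Nat) : Int))
        simp only [Nat.cast_zero] at hs
        rw [hs]
        rw [getD_set_self _ _ _ _ (by simp)]
        rw [List.set_set]
        rw [set_map_range (fun (q : Nat) => if q < j then -(q : Int) else 0) (qs.length + 1) j
              (-1 * ((j : Nat) : Int)) (by omega)]
        congr 1
        apply map_range_congr
        intro i hi
        by_cases h1 : i = j
        · subst h1
          rw [if_pos rfl, if_pos (by omega), neg_one_mul]
        · by_cases h2 : i < j
          · rw [if_neg h1, if_pos h2, if_pos (by omega)]
          · rw [if_neg h1, if_neg h2, if_neg (by omega)]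
      rw [hbody]
      have := ih (j + 1) (by omega)
      rw [show (((j + 1 : Nat) : Int)) = ((j : Nat) : Int) + 1 by push_cast; ring] at this
      exact this

theorem ged_eq (Que Dic : String) :
    GED_Soundex Que Dic
      = (rowsA Que.toList Dic.toList Dic.toList.length).getD Que.toList.length 0 := by
  unfold GED_Soundex
  dsimp only
  set qs := Que.toList
  set ds := Dic.toList
  have h0 : (List.replicate (ds.length + 1) (List.replicate (qs.length + 1) (0 : Int)))
      = (List.range (ds.length + 1)).map
        (fun i => if i < 0 then initRow qs.length i else List.replicate (qs.length + 1) 0) := by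
    rw [replicate_eq_map_range]
    apply map_range_congr
    intro i hi
    rw [if_neg (by omega)]
  rw [h0]
  have h1 := init1_loop qs ds (ds.length + 1) 0 (by omega)
  simp only [Nat.cast_zero] at h1
  rw [h1]
  have hrow00 : initRow qs.length 0
      = (List.range (qs.length + 1)).map (fun (q : Nat) => if q < 0 then -(q : Int) else 0) := by
    apply List.ext_getElem
    · simp [initRow]
    · intro i h1 h2
      simp only [List.getElem_map, List.getElem_range]
      rw [if_neg (by omega)]
      cases i with
      | zero => simp [initRow]
      | succ n => simp [initRow]
  have hM1 : ((List.range (ds.length + 1)).map (initRow qs.length)).set 0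
        ((List.range (qs.length + 1)).map (fun (q : Nat) => if q < 0 then -(q : Int) else 0))
      = (List.range (ds.length + 1)).map (initRow qs.length) := by
    refine set_eq_self_of_getD _ _ _ [] (by simp) ?_
    rw [PySem.List.getD_map_range _ _ _ _ (by omega)]
    exact hrow00
  rw [← hM1]
  have h2 := init2_loop qs ds (qs.length + 1) 0 (by omega)
  simp only [Nat.cast_zero] at h2
  rw [h2]
  have hmatA0 : ((List.range (ds.length + 1)).map (initRow qs.length)).set 0 (row0 qs)
      = matA qs ds 0 := by
    unfold matA
    rw [set_map_range _ _ _ _ (by omega)]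
    apply map_range_congr
    intro i hi
    by_cases h1 : i = 0
    · subst h1; rw [if_pos rfl, if_pos (by omega)]; rfl
    · rw [if_neg h1, if_neg (by omega)]
  rw [hmatA0]
  have hlam : (fun (m : List (List Int)) (d : Int) =>
      List.foldl (fun (m : List (List Int)) (q : Int) =>
        if (PySem.List.pyGetD ds (d - 1) ' ' != PySem.List.pyGetD qs (q - 1) ' ') = true then
          set2 m d q (pyMax (get2 m d (q - 1) + -3) (get2 m (d - 1) q + -3)
            (get2 m (d - 1) (q - 1) +
              GetReplaceScore (PySem.List.pyGetD qs (q - 1) ' ') (PySem.List.pyGetD ds (d - 1) ' ')))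
        else if (PySem.List.pyGetD ds (d - 1) ' ' == PySem.List.pyGetD qs (q - 1) ' ') = true then
          set2 m d q (get2 m (d - 1) (q - 1) + 3)
        else m) m (PySem.List.pyRange 1 ((qs.length : Int) + 1)))
      = fun (m : List (List Int)) (d : Int) =>
          List.foldl (innerBodyA qs ds d) m (PySem.List.pyRange 1 ((qs.length : Int) + 1)) := rfl
  rw [hlam]
  have h3 := outer_loop qs ds ds.length 0 (by omega)
  simp only [Nat.cast_zero, zero_add] at h3
  rw [h3]
  rw [get2_natCast, getD_matA _ _ _ _ (by omega), if_pos (le_refl _)]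

-- ---- A side → gRec: each row of the matrix DP is the gRec row ----
theorem innerRec_g (qs ds : List Char) (k : Nat) (hk : k < ds.length)
    (hrow : rowsA qs ds k = (List.range (qs.length + 1)).map (fun j => gRec qs ds k j)) :
    ∀ (t j : Nat), j + t = qs.length →
    innerRec (ds[k]) ((qs.zip (rowsA qs ds k).tail).drop j) (gRec qs ds (k + 1) j) (gRec qs ds k j)
      = (List.range t).map (fun i => gRec qs ds (k + 1) (j + 1 + i)) := by
  intro t
  induction t with
  | zero =>
      intro j hj
      rw [List.drop_eq_nil_of_le (by simp [List.length_zip, List.length_tail, length_rowsA]; omega)]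
      simp [innerRec]
  | succ t ih =>
      intro j hj
      have hjlt : j < qs.length := by omega
      rw [zip_tail_drop qs ds k j hjlt (length_rowsA qs ds k)]
      rw [innerRec]
      have hup : (rowsA qs ds k).getD (j + 1) 0 = gRec qs ds k (j + 1) := by
        rw [hrow, PySem.List.getD_map_range _ _ _ _ (by omega)]
      have hhead : (if ds[k] == qs[j] then gRec qs ds k j + 3
            else max (max (gRec qs ds (k + 1) j - 3) ((rowsA qs ds k).getD (j + 1) 0 - 3)) (gRec qs ds k j))
          = gRec qs ds (k + 1) (j + 1) := by
        rw [hup]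
        rw [show (gRec qs ds (k + 1) (j + 1)) =
          (if ds.getD k ' ' == qs.getD j ' ' then gRec qs ds k j + 3
           else max (max (gRec qs ds (k + 1) j - 3) (gRec qs ds k (j + 1) - 3)) (gRec qs ds k j)) from by
            simp [gRec]]
        rw [List.getD_eq_getElem _ ' ' (by omega : k < ds.length),
            List.getD_eq_getElem _ ' ' (by omega : j < qs.length)]
      rw [hhead]
      rw [hup]
      rw [ih (j + 1) (by omega)]
      rw [List.range_succ_eq_map, List.map_cons, List.map_map]
      congr 1
      norm_num
      intro a _
      congr 1
      omega

theorem rows_eq_g (qs ds : List Char) :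
    ∀ k, k ≤ ds.length →
    rowsA qs ds k = (List.range (qs.length + 1)).map (fun j => gRec qs ds k j) := by
  intro k
  induction k with
  | zero =>
      intro _
      unfold rowsA row0
      rw [List.take_zero]
      simp only [rowsFun]
      apply map_range_congr
      intro i hi
      simp [gRec]
  | succ k ih =>
      intro hk1
      have hk : k < ds.length := by omega
      rw [rowsA_succ qs ds k hk]
      unfold rowStep
      have hprev := ih (by omega)
      have h00 : (rowsA qs ds k).getD 0 0 = gRec qs ds k 0 := by
        rw [hprev, PySem.List.getD_map_range _ _ _ _ (by omega)]
      have hneg : (-((k : Int) + 1)) = gRec qs ds (k + 1) 0 := by simp [gRec]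
      rw [h00, hneg]
      have hInner := innerRec_g qs ds k hk hprev qs.length 0 (by omega)
      rw [List.drop_zero] at hInner
      rw [hInner]
      rw [List.range_succ_eq_map, List.map_cons, List.map_map]
      congr 1
      apply List.map_congr_left
      intro i _
      simp only [Function.comp]
      congr 1
      omega

-- ---- B side: the memoized recursion computes gRec ----
def GoodC (qs ds : List Char) (c : List (Option Int)) : Prop :=
  ∀ k v, c.getD k none = some v →
    ∃ d q, 1 ≤ q ∧ q ≤ qs.length ∧ k = d * (qs.length + 1) + q ∧ v = gRec qs ds d q

theorem key_inj (w d d' q q' : Nat) (hq : 1 ≤ q) (hq2 : q ≤ w - 1) (hq' : 1 ≤ q') (hq2' : q' ≤ w - 1)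
    (hw : 1 ≤ w) (h : d * w + q = d' * w + q') : d = d' ∧ q = q' := by
  have hqw : q < w := by omega
  have hqw' : q' < w := by omega
  have hm : (d * w + q) % w = q := by
    rw [Nat.mul_comm, Nat.mul_add_mod]
    exact Nat.mod_eq_of_lt hqw
  have hm' : (d' * w + q') % w = q' := by
    rw [Nat.mul_comm, Nat.mul_add_mod]
    exact Nat.mod_eq_of_lt hqw'
  have hqq : q = q' := by rw [← hm, ← hm', h]
  refine ⟨?_, hqq⟩
  subst hqq
  have := Nat.eq_of_mul_eq_mul_right (show 0 < w by omega) (by omega : d * w = d' * w)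
  exact this

theorem fB_correct (qs ds : List Char) :
    ∀ (n d q : Nat) (c : List (Option Int)), d + q ≤ n → q ≤ qs.length → GoodC qs ds c →
    (fB qs ds (qs.length + 1) d q c).1 = gRec qs ds d q ∧
    GoodC qs ds (fB qs ds (qs.length + 1) d q c).2 := by
  intro n
  induction n with
  | zero =>
      intro d q c hn hq hc
      have hd0 : d = 0 := by omega
      have hq0 : q = 0 := by omega
      subst hd0; subst hq0
      exact ⟨by simp [fB, gRec], by simpa [fB] using hc⟩
  | succ n ih =>
      intro d q c hn hq hc
      match d, q with
      | 0, q => exact ⟨by simp [fB, gRec], by simpa [fB] using hc⟩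
      | d+1, 0 => exact ⟨by simp [fB, gRec], by simpa [fB] using hc⟩
      | d+1, q+1 =>
          rw [fB]
          cases hg : c.getD ((d+1) * (qs.length + 1) + (q+1)) none with
          | some v =>
              obtain ⟨d', q', hq1', hq2', hkey, hval⟩ := hc _ _ hg
              have hinj := key_inj (qs.length + 1) d' (d+1) q' (q+1) hq1'
                (by omega) (by omega) (by omega) (by omega) hkey.symm
              refine ⟨?_, hc⟩
              simp only
              rw [hval, hinj.1, hinj.2]
          | none =>
              simp only
              by_cases hch : (ds.getD d ' ' == qs.getD q ' ') = true
              · rw [if_pos hch]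
                obtain ⟨hv, hc'⟩ := ih d q c (by omega) (by omega) hc
                constructor
                · simp only
                  rw [hv]
                  rw [show gRec qs ds (d+1) (q+1) =
                    (if ds.getD d ' ' == qs.getD q ' ' then gRec qs ds d q + 3
                     else max (max (gRec qs ds (d+1) q - 3) (gRec qs ds d (q+1) - 3)) (gRec qs ds d q))
                    from by simp [gRec], if_pos hch]
                · have hval : (fB qs ds (qs.length + 1) d q c).1 + 3 = gRec qs ds (d+1) (q+1) := by
                    rw [hv]
                    rw [show gRec qs ds (d+1) (q+1) =
                      (if ds.getD d ' ' == qs.getD q ' ' then gRec qs ds d q + 3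
                       else max (max (gRec qs ds (d+1) q - 3) (gRec qs ds d (q+1) - 3)) (gRec qs ds d q))
                      from by simp [gRec], if_pos hch]
                  intro k v hkv
                  simp only at hkv
                  by_cases hk : k = (d+1) * (qs.length + 1) + (q+1)
                  · subst hk
                    by_cases hlt : (d+1) * (qs.length + 1) + (q+1) < (fB qs ds (qs.length + 1) d q c).2.length
                    · rw [getD_set_self _ _ _ _ hlt] at hkv
                      refine ⟨d+1, q+1, by omega, by omega, rfl, ?_⟩
                      rw [← Option.some.inj hkv, hval]
                    · rw [List.set_eq_of_length_le (by omega)] at hkv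
                      exact hc' _ _ hkv
                  · rw [getD_set_ne _ _ _ _ _ hk] at hkv
                    exact hc' _ _ hkv
              · rw [if_neg hch]
                obtain ⟨hv1, hc1⟩ := ih (d+1) q c (by omega) (by omega) hc
                obtain ⟨hv2, hc2⟩ := ih d (q+1) _ (by omega) (by omega) hc1
                obtain ⟨hv3, hc3⟩ := ih d q _ (by omega) (by omega) hc2
                have hval : (max (max ((fB qs ds (qs.length + 1) (d+1) q c).1 - 3)
                      ((fB qs ds (qs.length + 1) d (q+1) (fB qs ds (qs.length + 1) (d+1) q c).2).1 - 3))
                      ((fB qs ds (qs.length + 1) d q (fB qs ds (qs.length + 1) d (q+1) (fB qs ds (qs.length + 1) (d+1) q c).2).2).1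
                        + GetReplaceScoreB (qs.getD q ' ') (ds.getD d ' ')))
                    = gRec qs ds (d+1) (q+1) := by
                  rw [hv1, hv2, hv3, grsB_eq_zero, add_zero]
                  rw [show gRec qs ds (d+1) (q+1) =
                    (if ds.getD d ' ' == qs.getD q ' ' then gRec qs ds d q + 3
                     else max (max (gRec qs ds (d+1) q - 3) (gRec qs ds d (q+1) - 3)) (gRec qs ds d q))
                    from by simp [gRec], if_neg hch]
                constructor
                · simp only
                  exact hval
                · intro k v hkv
                  simp only at hkv
                  by_cases hk : k = (d+1) * (qs.length + 1) + (q+1)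
                  · subst hk
                    by_cases hlt : (d+1) * (qs.length + 1) + (q+1) <
                        (fB qs ds (qs.length + 1) d q (fB qs ds (qs.length + 1) d (q+1) (fB qs ds (qs.length + 1) (d+1) q c).2).2).2.length
                    · rw [getD_set_self _ _ _ _ hlt] at hkv
                      refine ⟨d+1, q+1, by omega, by omega, rfl, ?_⟩
                      rw [← Option.some.inj hkv, hval]
                    · rw [List.set_eq_of_length_le (by omega)] at hkv
                      exact hc3 _ _ hkv
                  · rw [getD_set_ne _ _ _ _ _ hk] at hkv
                    exact hc3 _ _ hkv

-- ===== VERDICT (by name: the statement is the Claim_ definition above) =====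
theorem GED_Soundex_spec : Claim_equal_GED_Soundex := by
  unfold Claim_equal_GED_Soundex
  intro Que Dic _
  unfold Spec_GED_Soundex
  rw [ged_eq]
  rw [rows_eq_g Que.toList Dic.toList Dic.toList.length (le_refl _)]
  rw [PySem.List.getD_map_range _ _ _ _ (by omega)]
  unfold GED_Soundex_alt
  dsimp only
  have hempty : GoodC Que.toList Dic.toList
      (List.replicate ((Dic.toList.length + 1) * (Que.toList.length + 1)) none) := by
    intro k v hkv
    rw [List.getD_eq_getElem?_getD, List.getElem?_replicate] at hkv
    split_ifs at hkv <;> simp_all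
  exact ((fB_correct Que.toList Dic.toList (Dic.toList.length + Que.toList.length)
    Dic.toList.length Que.toList.length _ (le_refl _) (le_refl _) hempty).1).symm
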